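-- pv_equiv track=rewrite | github.com/dath2006/IntelliBoard | backend/app/agent/catalog.py | _fuzzy_token_match
-- ===== SOURCE A (Python) =====
-- def _fuzzy_token_match(query_tokens: set[str], haystack_tokens: set[str]) -> bool:
--     if not query_tokens or not haystack_tokens:
--         return False
--     for q in query_tokens:
--         if q in haystack_tokens:
--             continue
--         if not _has_close_token(q, haystack_tokens):
--             return False
--     return True
--
-- def _has_close_token(needle: str, haystack: set[str]) -> bool:
--     for token in haystack:
--         max_dist = _max_distance_for_token(needle, token)
--         if max_dist is None:
--             continue
--         if _edit_distance(needle, token, max_dist) <= max_dist: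
--             return True
--     return False
--
-- def _max_distance_for_token(a: str, b: str) -> int | None:
--     la, lb = len(a), len(b)
--     if la == 0 or lb == 0:
--         return None
--     length = max(la, lb)
--     if length <= 4:
--         return 1
--     if length <= 8:
--         return 2
--     if length <= 12:
--         return 3
--     return 4
--
-- def _edit_distance(a: str, b: str, max_dist: int) -> int:
--     if a == b:
--         return 0
--     if abs(len(a) - len(b)) > max_dist:
--         return max_dist + 1
--
--     # Ensure a is the shorter string for less work.
--     if len(a) > len(b):
--         a, b = b, a
--
--     prev = list(range(len(a) + 1))
--     for i, ch_b in enumerate(b, start=1):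
--         curr = [i] + [0] * len(a)
--         row_min = curr[0]
--         for j, ch_a in enumerate(a, start=1):
--             cost = 0 if ch_a == ch_b else 1
--             curr[j] = min(
--                 prev[j] + 1,
--                 curr[j - 1] + 1,
--                 prev[j - 1] + cost,
--             )
--             if curr[j] < row_min:
--                 row_min = curr[j]
--         if row_min > max_dist:
--             return max_dist + 1
--         prev = curr
--     return prev[-1]
-- ===== SOURCE B (Python) =====
-- def _fuzzy_token_match(query_tokens: set[str], haystack_tokens: set[str]) -> bool:
--     if not query_tokens or not haystack_tokens:
--         return False
--     return all(
--         q in haystack_tokens or any(_close(q, t) for t in haystack_tokens)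
--         for q in query_tokens
--     )
--
-- def _close(q: str, t: str) -> bool:
--     if not q or not t:
--         return False
--     k = min(4, (max(len(q), len(t)) + 3) // 4)
--     return _within(q, t, k)
--
-- def _within(a: str, b: str, k: int) -> bool:
--     # branch-and-bound edit-distance test: True iff editdist(a, b) <= k
--     if not a:
--         return len(b) <= k
--     if not b:
--         return len(a) <= k
--     if a[0] == b[0]:
--         return _within(a[1:], b[1:], k)
--     return k > 0 and (
--         _within(a[1:], b, k - 1)
--         or _within(a, b[1:], k - 1)
--         or _within(a[1:], b[1:], k - 1)
--     )
-- ===== Notes on version B (the rewrite author's own statement) =====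
-- stated objective: alternative
-- what changed: The row-DP edit-distance kernel with early exit is replaced by a recursive branch-and-bound threshold test (dist<=k decided directly, budget k decremented on mismatches), the threshold table becomes the closed form min(4,(L+3)//4), and the top-level loops become all/any comprehensions.
import Mathlib
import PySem

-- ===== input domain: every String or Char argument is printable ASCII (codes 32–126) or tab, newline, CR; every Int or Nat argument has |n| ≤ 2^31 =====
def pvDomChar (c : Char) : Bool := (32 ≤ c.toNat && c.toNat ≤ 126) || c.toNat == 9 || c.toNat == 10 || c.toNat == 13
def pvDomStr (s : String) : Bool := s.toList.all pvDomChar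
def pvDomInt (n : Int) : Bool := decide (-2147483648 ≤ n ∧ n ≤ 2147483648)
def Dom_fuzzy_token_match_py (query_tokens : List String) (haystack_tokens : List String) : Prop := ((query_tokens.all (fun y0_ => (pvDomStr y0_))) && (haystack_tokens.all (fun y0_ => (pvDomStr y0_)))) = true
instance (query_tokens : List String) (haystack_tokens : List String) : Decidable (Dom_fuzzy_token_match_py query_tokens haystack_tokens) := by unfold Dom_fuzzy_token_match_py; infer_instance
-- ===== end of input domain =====

-- B replaces A's early-exit row-DP edit-distance kernel by a recursive branch-and-bound
-- threshold test and the hand-written loops by all/any comprehensions (objective: alternative).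

-- ===== PORT A =====

-- inner loop of _edit_distance: walks the remaining chars of a together with the tail of
-- prev; args: remaining a, prev tail, prev[j-1], curr[j-1], row_min; returns (curr tail, row_min)
def edRowAux (chb : Char) : List Char → List Nat → Nat → Nat → Nat → (List Nat × Nat)
  | [], _, _, _, m => ([], m)
  | _ :: _, [], _, _, m => ([], m)  -- unreachable: prev tail always as long as remaining a
  | cha :: as, pj :: ps, pprev, cprev, m =>
      let cost : Nat := if cha = chb then 0 else 1
      let c := min (pj + 1) (min (cprev + 1) (pprev + cost))
      let m' := if c < m then c else m
      let r := edRowAux chb as ps pj c m'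
      (c :: r.1, r.2)

-- outer loop of _edit_distance over the chars of b (i = 1-based row index)
def edLoop (aL : List Char) (k : Nat) : List Char → Nat → List Nat → Nat
  | [], _, prev => prev.getLastD 0  -- prev[-1]; prev is never empty
  | chb :: bs, i, prev =>
      let r := edRowAux chb aL prev.tail (prev.headD 0) i i
      if r.2 > k then k + 1 else edLoop aL k bs (i + 1) (i :: r.1)

def edA (a0 b0 : List Char) (k : Nat) : Nat :=
  if a0 = b0 then 0
  else if b0.length + k < a0.length ∨ a0.length + k < b0.length then k + 1  -- abs(la-lb) > k
  else
    let p := if b0.length < a0.length then (b0, a0) else (a0, b0)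
    edLoop p.1 k p.2 1 (List.range (p.1.length + 1))

def maxDistA (a b : String) : Option Nat :=
  let la := a.toList.length
  let lb := b.toList.length
  if la = 0 ∨ lb = 0 then none
  else
    let length := max la lb
    if length ≤ 4 then some 1
    else if length ≤ 8 then some 2
    else if length ≤ 12 then some 3
    else some 4

def hasCloseA (needle : String) : List String → Bool
  | [] => false
  | t :: rest =>
      match maxDistA needle t with
      | none => hasCloseA needle rest
      | some md => if edA needle.toList t.toList md ≤ md then true else hasCloseA needle rest

def loopA (hs : List String) : List String → Bool
  | [] => true
  | q :: rest =>
      if hs.contains q then loopA hs rest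
      else if ! hasCloseA q hs then false
      else loopA hs rest

def fuzzy_token_match_py (query_tokens : List String) (haystack_tokens : List String) : Bool :=
  if query_tokens.isEmpty || haystack_tokens.isEmpty then false
  else loopA haystack_tokens query_tokens

-- ===== PORT B =====

-- branch-and-bound threshold test: true iff editdist(a,b) ≤ k
def withinB : List Char → List Char → Nat → Bool
  | [], b, k => decide (b.length ≤ k)
  | a, [], k => decide (a.length ≤ k)
  | x :: a, y :: b, k =>
      if x = y then withinB a b k
      else decide (0 < k) &&
        (withinB a (y :: b) (k - 1) || withinB (x :: a) b (k - 1) || withinB a b (k - 1))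
termination_by a b _ => a.length + b.length

def closeB (q t : String) : Bool :=
  if q.toList.isEmpty || t.toList.isEmpty then false
  else withinB q.toList t.toList (min 4 ((max q.toList.length t.toList.length + 3) / 4))

def fuzzy_token_match_py_alt (query_tokens : List String) (haystack_tokens : List String) : Bool :=
  if query_tokens.isEmpty || haystack_tokens.isEmpty then false
  else query_tokens.all (fun q =>
    haystack_tokens.contains q || haystack_tokens.any (fun t => closeB q t))

-- ===== PRECONDITION & SPEC =====
def Spec_fuzzy_token_match_py (query_tokens : List String) (haystack_tokens : List String) (out : Bool) : Prop := out = fuzzy_token_match_py_alt query_tokens haystack_tokens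
instance (query_tokens : List String) (haystack_tokens : List String) (out : Bool) : Decidable (Spec_fuzzy_token_match_py query_tokens haystack_tokens out) := by unfold Spec_fuzzy_token_match_py; infer_instance

-- ===== CLAIM (what is proved, stated in full; the proofs are below) =====
def Claim_equal_fuzzy_token_match_py : Prop := ∀ (query_tokens : List String) (haystack_tokens : List String), Dom_fuzzy_token_match_py query_tokens haystack_tokens → Spec_fuzzy_token_match_py query_tokens haystack_tokens (fuzzy_token_match_py query_tokens haystack_tokens)

-- ===== LEMMAS AND PROOFS =====

-- reference Levenshtein distance
def lev : List Char → List Char → Nat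
  | [], b => b.length
  | a, [] => a.length
  | x :: a, y :: b =>
      if x = y then lev a b
      else 1 + min (lev a (y :: b)) (min (lev (x :: a) b) (lev a b))
termination_by a b => a.length + b.length

theorem lev_nil_left (b : List Char) : lev [] b = b.length := by
  cases b <;> simp [lev]

theorem lev_nil_right (a : List Char) : lev a [] = a.length := by
  cases a <;> simp [lev]

theorem lev_cons_cons (x y : Char) (a b : List Char) :
    lev (x :: a) (y :: b) =
      if x = y then lev a b
      else 1 + min (lev a (y :: b)) (min (lev (x :: a) b) (lev a b)) := by
  simp [lev]

theorem lev_self (a : List Char) : lev a a = 0 := by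
  induction a with
  | nil => simp [lev_nil_left]
  | cons x a ih => simp [lev_cons_cons, ih]

theorem lev_symm (a b : List Char) : lev a b = lev b a := by
  fun_induction lev a b with
  | case1 b => rw [lev_nil_right]
  | case2 a h => rw [lev_nil_left]
  | case3 a y b ih => rw [lev_cons_cons, if_pos rfl, ih]
  | case4 x a y b hxy ih1 ih2 ih3 =>
      rw [lev_cons_cons, if_neg (fun h => hxy h.symm), ih1, ih2, ih3]
      omega

theorem lev_len (a b : List Char) :
    b.length ≤ a.length + lev a b ∧ a.length ≤ b.length + lev a b := by
  fun_induction lev a b with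
  | case1 b => simp only [List.length_nil]; omega
  | case2 a h => simp only [List.length_nil]; omega
  | case3 a y b ih => simp only [List.length_cons]; omega
  | case4 x a y b hxy ih1 ih2 ih3 => simp only [List.length_cons] at *; omega

-- adding/removing one leading char changes lev by at most 1
theorem lev_cons_bound :
    ∀ n (a b : List Char) (x : Char), a.length + b.length ≤ n →
      lev a b ≤ lev (x :: a) b + 1 ∧ lev (x :: a) b ≤ lev a b + 1 := by
  intro n
  induction n with
  | zero =>
      intro a b x h
      have ha : a = [] := by cases a <;> simp_all
      have hb : b = [] := by cases b <;> simp_all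
      subst ha; subst hb
      rw [lev_nil_right, lev_nil_right]
      simp
  | succ n ih =>
      intro a b x h
      cases b with
      | nil => rw [lev_nil_right, lev_nil_right]; simp; omega
      | cons y b' =>
          have hr : ∀ (c d : List Char) (z : Char), c.length + d.length ≤ n →
              lev c d ≤ lev c (z :: d) + 1 ∧ lev c (z :: d) ≤ lev c d + 1 := by
            intro c d z hcd
            have h0 := ih d c z (by omega)
            have e1 := lev_symm c d
            have e2 := lev_symm c (z :: d)
            have e3 := lev_symm (z :: d) c
            constructor <;> omega
          rw [lev_cons_cons]
          simp only [List.length_cons] at h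
          by_cases hxy : x = y
          · rw [if_pos hxy]
            subst hxy
            have h1 := hr a b' x (by omega)
            omega
          · rw [if_neg hxy]
            have h1 := hr a b' y (by omega)
            have h2 := ih a b' x (by omega)
            omega

theorem lev_min3 (x y : Char) (a b : List Char) :
    lev (x :: a) (y :: b) =
      min (lev a (y :: b) + 1)
        (min (lev (x :: a) b + 1) (lev a b + (if x = y then 0 else 1))) := by
  rw [lev_cons_cons]
  by_cases hxy : x = y
  · rw [if_pos hxy, if_pos hxy]
    subst hxy
    have hA := (lev_cons_bound (a.length + b.length) a b x le_rfl).1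
    have hB := (lev_cons_bound (b.length + a.length) b a x le_rfl).1
    have hs1 := lev_symm a b
    have hs2 := lev_symm a (x :: b)
    omega
  · rw [if_neg hxy, if_neg hxy]
    omega

-- snoc-level recurrence for lev
set_option maxHeartbeats 1000000 in
theorem lev_snoc (x y : Char) :
    ∀ n (p q : List Char), p.length + q.length ≤ n →
      lev (p ++ [x]) (q ++ [y]) =
        min (lev p (q ++ [y]) + 1)
          (min (lev (p ++ [x]) q + 1) (lev p q + (if x = y then 0 else 1))) := by
  intro n
  induction n with
  | zero =>
      intro p q h
      have hp : p = [] := by cases p <;> simp_all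
      have hq : q = [] := by cases q <;> simp_all
      subst hp; subst hq
      simp only [List.nil_append]
      rw [lev_min3 x y [] []]
  | succ n ih =>
      intro p q h
      cases p with
      | nil =>
          cases q with
          | nil =>
              simp only [List.nil_append]
              rw [lev_min3 x y [] []]
          | cons z q' =>
              simp only [List.nil_append, List.cons_append] at h ⊢
              have hIH := ih [] q' (by simp only [List.length_nil, List.length_cons] at h ⊢; omega)
              simp only [List.nil_append] at hIH
              rw [lev_min3 x z [] (q' ++ [y]), lev_min3 x z [] q', hIH]
              simp only [lev_nil_left, List.length_append, List.length_cons, List.length_nil]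
              by_cases hA : x = z
              · by_cases hB : x = y
                · simp only [if_pos hA, if_pos hB, add_zero, ← Nat.add_min_add_right]
                  try refine le_antisymm ?_ ?_ <;> simp only [le_min_iff, min_le_iff] <;> omega
                · simp only [if_pos hA, if_neg hB, add_zero, ← Nat.add_min_add_right]
                  try refine le_antisymm ?_ ?_ <;> simp only [le_min_iff, min_le_iff] <;> omega
              · by_cases hB : x = y
                · simp only [if_neg hA, if_pos hB, add_zero, ← Nat.add_min_add_right]
                  try refine le_antisymm ?_ ?_ <;> simp only [le_min_iff, min_le_iff] <;> omega
                · simp only [if_neg hA, if_neg hB, add_zero, ← Nat.add_min_add_right]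
                  try refine le_antisymm ?_ ?_ <;> simp only [le_min_iff, min_le_iff] <;> omega
      | cons u p' =>
          cases q with
          | nil =>
              simp only [List.nil_append, List.cons_append] at h ⊢
              have hIH := ih p' [] (by simp only [List.length_nil, List.length_cons] at h ⊢; omega)
              simp only [List.nil_append] at hIH
              rw [lev_min3 u y (p' ++ [x]) [], lev_min3 u y p' [], hIH]
              simp only [lev_nil_right, List.length_append, List.length_cons, List.length_nil]
              by_cases hA : u = y
              · by_cases hB : x = y
                · simp only [if_pos hA, if_pos hB, add_zero, ← Nat.add_min_add_right]
                  try refine le_antisymm ?_ ?_ <;> simp only [le_min_iff, min_le_iff] <;> omega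
                · simp only [if_pos hA, if_neg hB, add_zero, ← Nat.add_min_add_right]
                  try refine le_antisymm ?_ ?_ <;> simp only [le_min_iff, min_le_iff] <;> omega
              · by_cases hB : x = y
                · simp only [if_neg hA, if_pos hB, add_zero, ← Nat.add_min_add_right]
                  try refine le_antisymm ?_ ?_ <;> simp only [le_min_iff, min_le_iff] <;> omega
                · simp only [if_neg hA, if_neg hB, add_zero, ← Nat.add_min_add_right]
                  try refine le_antisymm ?_ ?_ <;> simp only [le_min_iff, min_le_iff] <;> omega
          | cons z q' =>
              simp only [List.cons_append] at h ⊢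
              simp only [List.length_cons] at h
              have h1 := ih p' (z :: q') (by simp only [List.length_cons]; omega)
              have h2 := ih (u :: p') q' (by simp only [List.length_cons]; omega)
              have h3 := ih p' q' (by omega)
              simp only [List.cons_append] at h1 h2 h3
              rw [lev_min3 u z (p' ++ [x]) (q' ++ [y]),
                  lev_min3 u z p' (q' ++ [y]),
                  lev_min3 u z (p' ++ [x]) q',
                  lev_min3 u z p' q']
              rw [h1, h2, h3]
              by_cases hA : u = z
              · by_cases hB : x = y
                · simp only [if_pos hA, if_pos hB, add_zero, ← Nat.add_min_add_right]
                  try refine le_antisymm ?_ ?_ <;> simp only [le_min_iff, min_le_iff] <;> omega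
                · simp only [if_pos hA, if_neg hB, add_zero, ← Nat.add_min_add_right]
                  try refine le_antisymm ?_ ?_ <;> simp only [le_min_iff, min_le_iff] <;> omega
              · by_cases hB : x = y
                · simp only [if_neg hA, if_pos hB, add_zero, ← Nat.add_min_add_right]
                  try refine le_antisymm ?_ ?_ <;> simp only [le_min_iff, min_le_iff] <;> omega
                · simp only [if_neg hA, if_neg hB, add_zero, ← Nat.add_min_add_right]
                  try refine le_antisymm ?_ ?_ <;> simp only [le_min_iff, min_le_iff] <;> omega

theorem lev_reverse : ∀ n (a b : List Char), a.length + b.length ≤ n →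
    lev a.reverse b.reverse = lev a b := by
  intro n
  induction n with
  | zero =>
      intro a b h
      have ha : a = [] := by cases a <;> simp_all
      have hb : b = [] := by cases b <;> simp_all
      simp [ha, hb]
  | succ n ih =>
      intro a b h
      cases a with
      | nil => simp [lev_nil_left]
      | cons x a' =>
          cases b with
          | nil => simp [lev_nil_right]
          | cons y b' =>
              simp only [List.reverse_cons]
              rw [lev_snoc x y (a'.reverse.length + b'.reverse.length) _ _ le_rfl]
              simp only [← List.reverse_cons]
              simp only [List.length_cons] at h
              rw [ih a' (y :: b') (by simp only [List.length_cons]; omega),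
                ih (x :: a') b' (by simp only [List.length_cons]; omega),
                ih a' b' (by omega)]
              rw [lev_min3]

theorem withinB_iff : ∀ (a b : List Char) (k : Nat), withinB a b k = true ↔ lev a b ≤ k := by
  intro a b k
  fun_induction withinB a b k with
  | case1 b k => rw [lev_nil_left]; simp
  | case2 a k h => rw [lev_nil_right]; simp
  | case3 a y b k ih => rw [lev_cons_cons, if_pos rfl]; exact ih
  | case4 x a y b k hxy ih1 ih2 ih3 =>
      rw [lev_cons_cons, if_neg hxy]
      simp only [Bool.and_eq_true, Bool.or_eq_true, decide_eq_true_eq]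
      rw [ih1, ih2, ih3]
      omega

-- a left extension of P is bounded below by lev of P against some suffix of T
theorem lev_suffix_bound : ∀ n (u T P : List Char), u.length + T.length ≤ n →
    ∃ T₁ T₂, T = T₁ ++ T₂ ∧ lev P T₂ ≤ lev (u ++ P) T := by
  intro n
  induction n with
  | zero =>
      intro u T P h
      have hu : u = [] := by cases u <;> simp_all
      exact ⟨[], T, by simp, by simp [hu]⟩
  | succ n ih =>
      intro u T P h
      cases u with
      | nil => exact ⟨[], T, by simp, by simp⟩
      | cons x u' =>
          cases T with
          | nil =>
              refine ⟨[], [], by simp, ?_⟩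
              rw [lev_nil_right, lev_nil_right]
              simp only [List.length_cons, List.length_append, List.length_nil]
              omega
          | cons y T' =>
              simp only [List.length_cons] at h
              rw [List.cons_append, lev_cons_cons]
              by_cases hxy : x = y
              · rw [if_pos hxy]
                obtain ⟨T₁, T₂, hT, hle⟩ := ih u' T' P (by omega)
                exact ⟨y :: T₁, T₂, by simp [hT], hle⟩
              · rw [if_neg hxy]
                obtain ⟨T₁a, T₂a, hTa, hlea⟩ := ih u' (y :: T') P (by simp only [List.length_cons]; omega)
                obtain ⟨T₁b, T₂b, hTb, hleb⟩ := ih (x :: u') T' P (by simp only [List.length_cons]; omega)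
                obtain ⟨T₁c, T₂c, hTc, hlec⟩ := ih u' T' P (by omega)
                have hleb' : lev P T₂b ≤ lev (x :: (u' ++ P)) T' := hleb
                rcases le_total (lev (u' ++ P) (y :: T')) (min (lev (x :: (u' ++ P)) T') (lev (u' ++ P) T')) with hm | hm
                · exact ⟨T₁a, T₂a, hTa, by omega⟩
                · rcases le_total (lev (x :: (u' ++ P)) T') (lev (u' ++ P) T') with hm2 | hm2
                  · exact ⟨y :: T₁b, T₂b, by simp [hTb], by omega⟩
                  · exact ⟨y :: T₁c, T₂c, by simp [hTc], by omega⟩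

-- the tail of a DP row: lev of P against reversed consumed prefixes extending R
def rowVals (P : List Char) : List Char → List Char → List Nat
  | R, cha :: as => lev P (cha :: R) :: rowVals P (cha :: R) as
  | _, [] => []

theorem edRowAux_spec (chb : Char) (P : List Char) :
    ∀ (as R : List Char) (m : Nat),
      edRowAux chb as (rowVals P R as) (lev P R) (lev (chb :: P) R) m
        = (rowVals (chb :: P) R as, (rowVals (chb :: P) R as).foldl min m) := by
  intro as
  induction as with
  | nil => intro R m; simp [rowVals, edRowAux]
  | cons cha as ih =>
      intro R m
      simp only [rowVals, edRowAux]
      have hc : min (lev P (cha :: R) + 1)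
          (min (lev (chb :: P) R + 1) (lev P R + (if cha = chb then 0 else 1)))
          = lev (chb :: P) (cha :: R) := by
        rw [lev_min3]
        by_cases hcc : chb = cha
        · subst hcc; simp
        · rw [if_neg hcc, if_neg (fun hh => hcc hh.symm)]
      rw [hc]
      have hm : (if lev (chb :: P) (cha :: R) < m then lev (chb :: P) (cha :: R) else m)
          = min m (lev (chb :: P) (cha :: R)) := by split <;> omega
      rw [hm, ih (cha :: R) (min m (lev (chb :: P) (cha :: R)))]
      simp [List.foldl]

theorem row_getLast (P : List Char) :
    ∀ (as R : List Char), (rowVals P R as).getLastD (lev P R) = lev P (as.reverse ++ R) := by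
  intro as
  induction as with
  | nil => intro R; simp [rowVals]
  | cons cha as ih =>
      intro R
      rw [rowVals, List.getLastD_cons, ih (cha :: R)]
      simp [List.reverse_cons, List.append_assoc]

theorem row_mem (P : List Char) :
    ∀ (as R : List Char) (j : Nat), j ≤ as.length →
      lev P ((as.take j).reverse ++ R) ∈ (lev P R :: rowVals P R as) := by
  intro as
  induction as with
  | nil =>
      intro R j hj
      simp only [List.length_nil, Nat.le_zero] at hj
      simp [hj, rowVals]
  | cons cha as ih =>
      intro R j hj
      cases j with
      | zero => simp
      | succ j =>
          rw [rowVals]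
          have hmem := ih (cha :: R) j (by simp only [List.length_cons] at hj; omega)
          have hE : (((cha :: as).take (j + 1)).reverse ++ R)
              = ((as.take j).reverse ++ (cha :: R)) := by
            simp [List.take_succ_cons, List.append_assoc]
          rw [hE]
          exact List.mem_cons_of_mem _ hmem

theorem foldl_min_le (l : List Nat) : ∀ (m x : Nat), x ∈ m :: l → l.foldl min m ≤ x := by
  induction l with
  | nil =>
      intro m x hx
      simp only [List.mem_cons, List.not_mem_nil, or_false] at hx
      subst hx
      simp [List.foldl]
  | cons c l ih =>
      intro m x hx
      have hstep : (c :: l).foldl min m = l.foldl min (min m c) := rfl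
      rw [hstep]
      have hself := ih (min m c) (min m c) (by simp)
      rcases List.mem_cons.1 hx with h | h
      · omega
      · rcases List.mem_cons.1 h with h2 | h2
        · omega
        · exact ih (min m c) x (List.mem_cons_of_mem _ h2)

theorem rowVals_nil_P : ∀ (as R : List Char),
    rowVals [] R as = List.range' (R.length + 1) as.length := by
  intro as
  induction as with
  | nil => intro R; simp [rowVals]
  | cons cha as ih =>
      intro R
      rw [rowVals, lev_nil_left]
      have h := ih (cha :: R)
      simp only [List.length_cons] at h
      rw [h]
      simp [List.range'_succ]

theorem range_eq_row (a : List Char) :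
    List.range (a.length + 1) = lev [] [] :: rowVals [] [] a := by
  rw [rowVals_nil_P a [], lev_nil_left]
  rw [List.range_eq_range', List.range'_succ]
  simp

theorem edLoop_spec (a : List Char) (k : Nat) :
    ∀ (bs P : List Char),
      (edLoop a k bs (P.length + 1) (lev P [] :: rowVals P [] a) ≤ k)
        ↔ (lev (bs.reverse ++ P) a.reverse ≤ k) := by
  intro bs
  induction bs with
  | nil =>
      intro P
      rw [edLoop, List.getLastD_cons, row_getLast P a []]
      simp
  | cons chb bs ih =>
      intro P
      rw [edLoop]
      simp only [List.tail_cons, List.headD_cons]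
      have hP1 : P.length + 1 = lev (chb :: P) [] := by rw [lev_nil_right]; rfl
      rw [hP1, edRowAux_spec chb P a []]
      by_cases hex : (rowVals (chb :: P) [] a).foldl min (lev (chb :: P) []) > k
      · rw [if_pos hex]
        constructor
        · intro hcon; omega
        · intro hcon
          exfalso
          obtain ⟨T₁, T₂, hT, hle⟩ :=
            lev_suffix_bound (bs.reverse.length + a.reverse.length) bs.reverse a.reverse
              (chb :: P) le_rfl
          have ha : a = T₂.reverse ++ T₁.reverse := by
            have h' := congrArg List.reverse hT
            simpa using h'
          have hT₂ : T₂ = (a.take T₂.length).reverse := by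
            rw [ha, List.take_append_of_le_length (by simp),
              List.take_of_length_le (by simp)]
            simp
          have hjlen : T₂.length ≤ a.length := by
            have h' := congrArg List.length hT
            simp only [List.length_reverse, List.length_append] at h'
            omega
          have hmem : lev (chb :: P) T₂ ∈
              (lev (chb :: P) [] :: rowVals (chb :: P) [] a) := by
            have h' := row_mem (chb :: P) a [] T₂.length hjlen
            rw [List.append_nil] at h'
            rw [hT₂]
            exact h'
          have hfold := foldl_min_le (rowVals (chb :: P) [] a) (lev (chb :: P) [])
            (lev (chb :: P) T₂) hmem
          have hfin : lev ((chb :: bs).reverse ++ P) a.reverse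
              = lev (bs.reverse ++ (chb :: P)) a.reverse := by
            simp
          rw [hfin] at hcon
          omega
      · rw [if_neg hex]
        have h2 : lev (chb :: P) [] + 1 = (chb :: P).length + 1 := by
          rw [lev_nil_right]
        rw [h2, ih (chb :: P)]
        constructor <;> (intro h'; simpa [List.append_assoc] using h')

theorem edA_le_iff (a b : List Char) (k : Nat) : (edA a b k ≤ k) ↔ lev a b ≤ k := by
  unfold edA
  split_ifs with h1 h2 hsw
  · subst h1; rw [lev_self]
  · have hl := lev_len a b
    constructor
    · intro h; omega
    · intro h; omega
  · -- swap branch: b is strictly shorter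
    have hs := edLoop_spec b k a []
    rw [show ([] : List Char).length + 1 = 1 from rfl, ← range_eq_row b] at hs
    rw [hs, List.append_nil]
    rw [lev_reverse (a.length + b.length) a b le_rfl]
  · -- no swap
    show edLoop a k b 1 (List.range (a.length + 1)) ≤ k ↔ lev a b ≤ k
    have hs := edLoop_spec a k b []
    rw [show ([] : List Char).length + 1 = 1 from rfl, ← range_eq_row a] at hs
    rw [hs, List.append_nil]
    rw [lev_reverse (b.length + a.length) b a (by omega)]
    rw [lev_symm b a]

theorem maxDistA_eq (q t : String) :
    maxDistA q t = if q.toList.isEmpty || t.toList.isEmpty then none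
      else some (min 4 ((max q.toList.length t.toList.length + 3) / 4)) := by
  by_cases hq : q.toList = []
  · simp [maxDistA, hq]
  · by_cases ht : t.toList = []
    · simp [maxDistA, ht]
    · have hq' : q.toList.length ≠ 0 := by simpa [List.length_eq_zero_iff] using hq
      have ht' : t.toList.length ≠ 0 := by simpa [List.length_eq_zero_iff] using ht
      simp only [maxDistA]
      rw [if_neg (by tauto)]
      rw [if_neg (show ¬((q.toList.isEmpty || t.toList.isEmpty) = true) by
        simp [List.isEmpty_iff, hq, ht])]
      have hgen : ∀ L : Nat, L ≠ 0 →
          (if L ≤ 4 then some 1 else if L ≤ 8 then some 2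
            else if L ≤ 12 then some 3 else (some 4 : Option Nat))
            = some (min 4 ((L + 3) / 4)) := by
        intro L hL
        split_ifs <;> (congr 1; omega)
      exact hgen (max q.toList.length t.toList.length) (by omega)

theorem close_token_eq (q t : String) :
    (match maxDistA q t with
      | none => false
      | some md => decide (edA q.toList t.toList md ≤ md)) = closeB q t := by
  rw [maxDistA_eq]
  by_cases h : (q.toList.isEmpty || t.toList.isEmpty) = true
  · rw [if_pos h]
    unfold closeB
    rw [if_pos h]
  · rw [if_neg h]
    unfold closeB
    rw [if_neg h]
    simp only
    have h1 := edA_le_iff q.toList t.toList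
      (min 4 ((max q.toList.length t.toList.length + 3) / 4))
    have h2 := withinB_iff q.toList t.toList
      (min 4 ((max q.toList.length t.toList.length + 3) / 4))
    cases hw : withinB q.toList t.toList
        (min 4 ((max q.toList.length t.toList.length + 3) / 4))
    · rw [hw] at h2
      simp only [Bool.false_eq_true, false_iff, not_le] at h2
      exact decide_eq_false (fun hc => by have := h1.mp hc; omega)
    · rw [hw] at h2
      simp only [true_iff] at h2
      exact decide_eq_true (h1.mpr h2)

theorem hasCloseA_eq (q : String) (hs : List String) :
    hasCloseA q hs = hs.any (fun t => closeB q t) := by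
  induction hs with
  | nil => simp [hasCloseA]
  | cons t rest ih =>
      rw [List.any_cons, ← close_token_eq q t]
      show (match maxDistA q t with
        | none => hasCloseA q rest
        | some md => if edA q.toList t.toList md ≤ md then true else hasCloseA q rest) = _
      cases hmd : maxDistA q t with
      | none => simp [ih]
      | some md =>
          by_cases hle : edA q.toList t.toList md ≤ md
          · simp [hle]
          · simp [hle, ih]

theorem loopA_eq (hs : List String) (qs : List String) :
    loopA hs qs = qs.all (fun q => hs.contains q || hs.any (fun t => closeB q t)) := by
  induction qs with
  | nil => simp [loopA]
  | cons q rest ih =>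
      rw [loopA, List.all_cons, ← hasCloseA_eq]
      by_cases hc : hs.contains q = true
      · rw [if_pos hc, hc]
        simp [ih]
      · rw [if_neg hc]
        simp only [Bool.not_eq_true] at hc
        rw [hc]
        cases hcl : hasCloseA q hs
        · simp
        · simp [ih]

-- ===== VERDICT (by name: the statement is the Claim_ definition above) =====
theorem fuzzy_token_match_py_spec : Claim_equal_fuzzy_token_match_py := by
  intro qs hs _
  unfold Spec_fuzzy_token_match_py fuzzy_token_match_py fuzzy_token_match_py_alt
  by_cases he : (qs.isEmpty || hs.isEmpty) = true
  · rw [if_pos he, if_pos he]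
  · rw [if_neg he, if_neg he]
    exact loopA_eq hs qs
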